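-- pv_equiv track=rewrite | github.com/tttksj404/ssafy-master | 02_스택_큐/while과pop.py | even_elements
-- ===== SOURCE A (Python) =====
-- def even_elements(numbers):
--
--     new_list = []
--     for count in numbers:
--         if count % 2 ==0:
--             new_list.append(count) #메커니즘은 짝수는 담아두고  홀수는 따로 다 버려버리고 거기다 extend로 다시 짝수만 담아보기
--         else:
--             pass
--
--     ind = 0
--     while numbers: #numbers가 비지 않을동안 계속 반복하라는 것
--         numbers.pop(0)  #pop은 ()안에 인덱스 값이 들어가는거지 어떤 특정 값이 들어가는게 아니다  #pop[0]을 계속하면 한칸씩 당겨져서 계속 사라짐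
--     numbers.extend(new_list)
--     return numbers
-- ===== SOURCE B (Python) =====
-- def even_elements(numbers):
--     w = 0
--     for x in numbers:
--         if x % 2 == 0:
--             numbers[w] = x
--             w += 1
--     del numbers[w:]
--     return numbers
-- ===== Notes on version B (the rewrite author's own statement) =====
-- stated objective: alternative
-- what changed: Replaces A's build-a-second-list / drain-via-pop(0) / extend pipeline with a single-pass in-place two-pointer compaction (write cursor w, then del numbers[w:]).
import Mathlib
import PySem

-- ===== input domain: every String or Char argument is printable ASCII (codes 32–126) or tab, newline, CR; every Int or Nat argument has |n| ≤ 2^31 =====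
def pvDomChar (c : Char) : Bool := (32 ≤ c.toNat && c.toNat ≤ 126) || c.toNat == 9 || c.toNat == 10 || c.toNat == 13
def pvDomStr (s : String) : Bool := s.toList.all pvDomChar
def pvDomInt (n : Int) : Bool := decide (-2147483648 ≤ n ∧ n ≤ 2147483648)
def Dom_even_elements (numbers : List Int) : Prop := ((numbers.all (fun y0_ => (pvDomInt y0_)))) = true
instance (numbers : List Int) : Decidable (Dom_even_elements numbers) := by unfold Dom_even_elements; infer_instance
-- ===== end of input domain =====

-- B replaces A's build-second-list / pop(0)-drain / extend pipeline by a one-pass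
-- in-place two-pointer compaction (write cursor w, then del numbers[w:]); same
-- in-place mutation of the argument, same return value.


-- ===== PORT A =====
-- while numbers: numbers.pop(0)  — drains the list one head at a time
def evenDrain (numbers : List Int) : List Int :=
  match numbers with
  | [] => []
  | _ :: t => evenDrain t

def even_elements (numbers : List Int) : List Int :=
  let new_list := numbers.foldl
    (fun acc count => if PySem.Int.mod count 2 == 0 then acc ++ [count] else acc) []
  let numbers := evenDrain numbers
  numbers ++ new_list

-- ===== PORT B =====
-- for x in numbers: if x % 2 == 0: numbers[w] = x; w += 1   (read index i, write index w)
def evenCompact (cur : List Int) (i w : Nat) : List Int × Nat :=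
  if h : i < cur.length then
    let x := cur[i]
    if PySem.Int.mod x 2 == 0 then evenCompact (cur.set w x) (i + 1) (w + 1)
    else evenCompact cur (i + 1) w
  else (cur, w)
termination_by cur.length - i
decreasing_by all_goals simp_all; omega

def even_elements_alt (numbers : List Int) : List Int :=
  let (l, w) := evenCompact numbers 0 0
  l.take w  -- del numbers[w:]

-- ===== PRECONDITION & SPEC =====
def Spec_even_elements (numbers : List Int) (out : List Int) : Prop := out = even_elements_alt numbers
instance (numbers : List Int) (out : List Int) : Decidable (Spec_even_elements numbers out) := by unfold Spec_even_elements; infer_instance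

-- ===== CLAIM (what is proved, stated in full; the proofs are below) =====
def Claim_equal_even_elements : Prop := ∀ (numbers : List Int), Dom_even_elements numbers → Spec_even_elements numbers (even_elements numbers)

-- ===== LEMMAS AND PROOFS =====
theorem evenDrain_eq_nil (numbers : List Int) : evenDrain numbers = [] := by
  induction numbers with
  | nil => rfl
  | cons h t ih => simpa [evenDrain] using ih

theorem evenCompact_invariant (n : Nat) :
    ∀ (cur : List Int) (i w : Nat), cur.length - i ≤ n → w ≤ i →
      (evenCompact cur i w).1.take (evenCompact cur i w).2
        = cur.take w ++ (cur.drop i).filter (fun x => PySem.Int.mod x 2 == 0) := by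
  induction n with
  | zero =>
    intro cur i w hn hw
    have hle : cur.length ≤ i := by omega
    rw [evenCompact]
    simp [Nat.not_lt.mpr hle, List.drop_eq_nil_of_le hle]
  | succ n ih =>
    intro cur i w hn hw
    rw [evenCompact]
    by_cases h : i < cur.length
    · have hdrop : cur.drop i = cur[i] :: cur.drop (i + 1) :=
        (List.drop_eq_getElem_cons h)
      by_cases he : PySem.Int.mod cur[i] 2 == 0
      · have hwlen : w < cur.length := by omega
        have hrec := ih (cur.set w cur[i]) (i + 1) (w + 1)
          (by simp; omega) (by omega)
        simp only [h, dif_pos, he, if_pos]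
        rw [hrec, hdrop]
        simp only [List.filter_cons, he]
        have h1 : (cur.set w cur[i]).take (w + 1) = cur.take w ++ [cur[i]] := by
          rw [List.take_succ, List.take_set_of_le (Nat.le_refl w)]
          simp [List.getElem?_set, hwlen]
        have h2 : (cur.set w cur[i]).drop (i + 1) = cur.drop (i + 1) :=
          List.drop_set_of_lt (by omega)
        rw [h1, h2]
        simp
      · have hrec := ih cur (i + 1) w (by omega) (by omega)
        simp only [h, dif_pos, he, Bool.false_eq_true, if_false]
        rw [hrec, hdrop, List.filter_cons]
        rw [PySem.Int.mod_eq_emod_of_pos (by omega)] at he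
        simp [he]
    · rw [dif_neg h]
      have hle : cur.length ≤ i := Nat.le_of_not_lt h
      simp [List.drop_eq_nil_of_le hle]

theorem alt_eq_filter (numbers : List Int) :
    even_elements_alt numbers
      = numbers.filter (fun x => PySem.Int.mod x 2 == 0) := by
  have h := evenCompact_invariant numbers.length numbers 0 0 (by omega) (by omega)
  simpa [even_elements_alt] using h

-- ===== VERDICT (by name: the statement is the Claim_ definition above) =====
theorem even_elements_spec : Claim_equal_even_elements := by
  intro numbers _
  unfold Spec_even_elements even_elements
  rw [alt_eq_filter, evenDrain_eq_nil, PySem.List.foldl_append_if_eq_filter]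
  simp
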